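-- pv_equiv track=rewrite | github.com/masahiro-taisho/taisho-site | scripts/generate_blog.py | render_category_sidebar
-- ===== SOURCE A (Python) =====
-- from typing import Dict, List, Optional, Tuple
--
-- BASE = "/taisho-site"  # Project Pages の basePath。User Pagesなら "" にする
--
-- CATEGORY_LABEL: Dict[str, str] = {
--     "diary": "日記",
--     "gadget": "ガジェット",
--     "youtube": "YouTube",
--     "movies": "映画／TV／映像作品",
--     "books": "小説／漫画",
--     "music": "音楽",
--     "software": "ソフト",
--     "gundam": "ガンダム",
-- }
--
-- CATEGORY_ORDER: List[str] = [
--     "gadget",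
--     "youtube",
--     "gundam",
--     "diary",
--     "movies",
--     "music",
--     "software",
--     "books",
-- ]
--
-- def category_label(cat: str) -> str:
--     return CATEGORY_LABEL.get(cat, cat)
--
-- def ordered_categories(cats: List[str]) -> List[str]:
--     s = set(cats)
--     ordered = [c for c in CATEGORY_ORDER if c in s]
--     rest = sorted([c for c in s if c not in set(CATEGORY_ORDER)])
--     return ordered + rest
--
-- def render_category_sidebar(counts: Dict[str, int]) -> str:
--     cats = ordered_categories(list(counts.keys()))
--     items = []
--     for c in cats:
--         label = category_label(c)
--         n = counts[c]
--         href = f"{BASE}/blog/{c}/index.html"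
--         items.append(
--             f'<li><a class="cat-link" href="{href}">{label}<span class="cat-count">({n})</span></a></li>'
--         )
--     return f"""\
-- <aside class="home-side">
--   <div class="side-box">
--     <h2 class="side-title">カテゴリ</h2>
--     <ul class="cat-list">
--       {''.join(items)}
--     </ul>
--   </div>
-- </aside>
-- """
-- ===== SOURCE B (Python) =====
-- from typing import Dict, List
--
-- BASE = "/taisho-site"  # Project Pages の basePath。User Pagesなら "" にする
--
-- CATEGORY_LABEL: Dict[str, str] = {
--     "diary": "日記",
--     "gadget": "ガジェット",
--     "youtube": "YouTube",
--     "movies": "映画／TV／映像作品",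
--     "books": "小説／漫画",
--     "music": "音楽",
--     "software": "ソフト",
--     "gundam": "ガンダム",
-- }
--
-- CATEGORY_ORDER: List[str] = [
--     "gadget",
--     "youtube",
--     "gundam",
--     "diary",
--     "movies",
--     "music",
--     "software",
--     "books",
-- ]
--
-- # rank of each known category in the fixed order; unknown categories share
-- # the sentinel rank len(CATEGORY_ORDER) and are then ordered by name
-- RANK: Dict[str, int] = {c: i for i, c in enumerate(CATEGORY_ORDER)}
--
-- def category_label(cat: str) -> str:
--     return CATEGORY_LABEL.get(cat, cat)
--
-- def render_category_sidebar(counts: Dict[str, int]) -> str: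
--     # single keyed sort: the key is the one-digit rank followed by the name
--     cats = sorted(set(counts.keys()),
--                   key=lambda c: str(RANK.get(c, len(CATEGORY_ORDER))) + c)
--     items = ''.join(
--         f'<li><a class="cat-link" href="{BASE}/blog/{c}/index.html">{category_label(c)}<span class="cat-count">({counts[c]})</span></a></li>'
--         for c in cats
--     )
--     return f"""\
-- <aside class="home-side">
--   <div class="side-box">
--     <h2 class="side-title">カテゴリ</h2>
--     <ul class="cat-list">
--       {items}
--     </ul>
--   </div>
-- </aside>
-- """
-- ===== Notes on version B (the rewrite author's own statement) =====
-- stated objective: alternative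
-- what changed: A's partition (filter CATEGORY_ORDER by membership, then append the sorted leftovers) and its item-appending loop are replaced by one keyed sort of set(counts) with a rank-then-name string key (rank from a precomputed RANK dict, sentinel rank for unknown categories) and a join over a generator.
import Mathlib
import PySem

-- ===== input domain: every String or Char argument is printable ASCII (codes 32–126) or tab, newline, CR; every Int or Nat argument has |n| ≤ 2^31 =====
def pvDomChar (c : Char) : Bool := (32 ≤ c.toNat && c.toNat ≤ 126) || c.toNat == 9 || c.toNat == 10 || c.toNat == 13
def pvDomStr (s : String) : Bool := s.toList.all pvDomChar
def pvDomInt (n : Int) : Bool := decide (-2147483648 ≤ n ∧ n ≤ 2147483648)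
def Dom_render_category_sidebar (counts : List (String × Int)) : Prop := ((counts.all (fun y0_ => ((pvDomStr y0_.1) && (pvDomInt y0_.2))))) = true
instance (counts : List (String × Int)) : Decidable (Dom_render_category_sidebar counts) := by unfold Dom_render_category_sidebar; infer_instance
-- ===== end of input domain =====

-- B replaces A's partition (filter CATEGORY_ORDER, then append sorted leftovers) by ONE keyed
-- sort with a rank-then-name key; objective: alternative decomposition, same rendering.
-- The dict argument is modelled as its item list (insertion order, later duplicates overwrite).

-- ===== PORT A =====
-- shared module constants / helpers (identical in Source A and Source B)
def pvBASE : String := "/taisho-site"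

def pvCATEGORY_LABEL : PySem.Dict String String := PySem.Dict.ofList
  [("diary", "日記"), ("gadget", "ガジェット"), ("youtube", "YouTube"),
   ("movies", "映画／TV／映像作品"), ("books", "小説／漫画"), ("music", "音楽"),
   ("software", "ソフト"), ("gundam", "ガンダム")]

def pvCATEGORY_ORDER : List String :=
  ["gadget", "youtube", "gundam", "diary", "movies", "music", "software", "books"]

def category_label (cat : String) : String := pvCATEGORY_LABEL.getD cat cat

-- one <li> item (the f-string, identical in both sources); str(n) = PySem.Int.toStr
def pvItem (c : String) (n : Int) : String :=
  "<li><a class=\"cat-link\" href=\"" ++ pvBASE ++ "/blog/" ++ c ++ "/index.html\">" ++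
    category_label c ++ "<span class=\"cat-count\">(" ++ PySem.Int.toStr n ++ ")</span></a></li>"

-- the outer f-string (identical in both sources)
def pvWrap (items : String) : String :=
  "<aside class=\"home-side\">\n  <div class=\"side-box\">\n    <h2 class=\"side-title\">カテゴリ</h2>\n    <ul class=\"cat-list\">\n      "
    ++ items ++ "\n    </ul>\n  </div>\n</aside>\n"

def ordered_categories (cats : List String) : List String :=
  let s := PySem.Set.ofList cats
  let ordered := pvCATEGORY_ORDER.filter (fun c => PySem.Set.contains s c)
  let rest := PySem.List.sorted
    (s.filter (fun c => !(PySem.Set.contains (PySem.Set.ofList pvCATEGORY_ORDER) c)))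
    (fun x => x) false
  ordered ++ rest

def render_category_sidebar (counts : List (String × Int)) : String :=
  let d := PySem.Dict.ofList counts
  let cats := ordered_categories d.keys
  let items := cats.foldl (fun acc c => acc ++ [pvItem c (d.getD c 0)]) []
  pvWrap (PySem.Str.join "" items)

-- ===== PORT B =====
-- RANK = {c: i for i, c in enumerate(CATEGORY_ORDER)}
def pvRANK : PySem.Dict String Int :=
  PySem.Dict.ofList ((PySem.List.enumerate pvCATEGORY_ORDER 0).map (fun p => (p.2, p.1)))

-- the sort key: str(RANK.get(c, len(CATEGORY_ORDER))) + c
def pvKeyB (c : String) : String :=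
  PySem.Int.toStr (pvRANK.getD c (pvCATEGORY_ORDER.length : Int)) ++ c

def render_category_sidebar_alt (counts : List (String × Int)) : String :=
  let d := PySem.Dict.ofList counts
  let cats := PySem.List.sorted (PySem.Set.ofList d.keys) pvKeyB false
  pvWrap (PySem.Str.join "" (cats.map (fun c => pvItem c (d.getD c 0))))

-- ===== PRECONDITION & SPEC =====
def Spec_render_category_sidebar (counts : List (String × Int)) (out : String) : Prop := out = render_category_sidebar_alt counts
instance (counts : List (String × Int)) (out : String) : Decidable (Spec_render_category_sidebar counts out) := by unfold Spec_render_category_sidebar; infer_instance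

-- ===== CLAIM (what is proved, stated in full; the proofs are below) =====
def Claim_equal_render_category_sidebar : Prop := ∀ (counts : List (String × Int)), Dom_render_category_sidebar counts → Spec_render_category_sidebar counts (render_category_sidebar counts)

-- ===== LEMMAS AND PROOFS =====

-- rank lookup misses exactly outside CATEGORY_ORDER
theorem rank_getD_not_mem {c : String} (hc : c ∉ pvCATEGORY_ORDER) :
    pvRANK.getD c ((pvCATEGORY_ORDER.length : Nat) : Int) = 8 := by
  have h : pvRANK = PySem.Dict.mk [("gadget", 0), ("youtube", 1), ("gundam", 2), ("diary", 3),
      ("movies", 4), ("music", 5), ("software", 6), ("books", 7)] := by decide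
  simp only [pvCATEGORY_ORDER, List.mem_cons, List.not_mem_nil, or_false, not_or] at hc
  obtain ⟨h1, h2, h3, h4, h5, h6, h7, h8⟩ := hc
  rw [h]
  simp [PySem.Dict.getD, PySem.Dict.get?, pvCATEGORY_ORDER,
    Ne.symm h1, Ne.symm h2, Ne.symm h3, Ne.symm h4, Ne.symm h5, Ne.symm h6, Ne.symm h7, Ne.symm h8]

theorem keyB_not_mem {c : String} (hc : c ∉ pvCATEGORY_ORDER) : pvKeyB c = "8" ++ c := by
  unfold pvKeyB
  rw [rank_getD_not_mem hc, show PySem.Int.toStr 8 = "8" from by decide]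

theorem keyB_lt_of_not_mem {a b : String} (ha : a ∉ pvCATEGORY_ORDER) (hb : b ∉ pvCATEGORY_ORDER)
    (h : a < b) : pvKeyB a < pvKeyB b := by
  rw [keyB_not_mem ha, keyB_not_mem hb, String.lt_iff_toList_lt, String.toList_append,
    String.toList_append]
  have h8 : ("8" : String).toList = ['8'] := by decide
  rw [h8]
  exact List.Lex.cons (String.lt_iff_toList_lt.mp h)

-- every key of a known category starts with a digit below '8'
theorem keyB_mem_head {a : String} (ha : a ∈ pvCATEGORY_ORDER) :
    ∃ c t, (pvKeyB a).toList = c :: t ∧ c < '8' := by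
  simp only [pvCATEGORY_ORDER, List.mem_cons, List.not_mem_nil, or_false] at ha
  rcases ha with rfl | rfl | rfl | rfl | rfl | rfl | rfl | rfl
  · exact ⟨'0', "gadget".toList, by decide, by decide⟩
  · exact ⟨'1', "youtube".toList, by decide, by decide⟩
  · exact ⟨'2', "gundam".toList, by decide, by decide⟩
  · exact ⟨'3', "diary".toList, by decide, by decide⟩
  · exact ⟨'4', "movies".toList, by decide, by decide⟩
  · exact ⟨'5', "music".toList, by decide, by decide⟩
  · exact ⟨'6', "software".toList, by decide, by decide⟩
  · exact ⟨'7', "books".toList, by decide, by decide⟩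

theorem keyB_lt_cross {a b : String} (ha : a ∈ pvCATEGORY_ORDER) (hb : b ∉ pvCATEGORY_ORDER) :
    pvKeyB a < pvKeyB b := by
  obtain ⟨c, t, he, hc⟩ := keyB_mem_head ha
  rw [keyB_not_mem hb, String.lt_iff_toList_lt, String.toList_append, he]
  have h8 : ("8" : String).toList = ['8'] := by decide
  rw [h8]
  exact List.Lex.rel hc

theorem pairwise_keyB_order : List.Pairwise (fun a b => pvKeyB a < pvKeyB b) pvCATEGORY_ORDER := by
  simp only [String.lt_iff_toList_lt]
  decide

-- core: A's partition equals B's single keyed sort, for any key list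
theorem sorted_key_eq_ordered (ks : List String) :
    PySem.List.sorted (PySem.Set.ofList ks) pvKeyB false = ordered_categories ks := by
  simp only [ordered_categories]
  have hOS : ∀ c : String,
      (PySem.Set.contains (PySem.Set.ofList pvCATEGORY_ORDER) c = true) ↔ c ∈ pvCATEGORY_ORDER :=
    fun c => (PySem.Set.contains_iff _ c).trans (PySem.Set.mem_ofList _ c)
  have hSnd : (PySem.Set.ofList ks).Nodup := PySem.Set.nodup_ofList ks
  have hrest_perm : (PySem.List.sorted
        ((PySem.Set.ofList ks).filter
          (fun c => !(PySem.Set.contains (PySem.Set.ofList pvCATEGORY_ORDER) c)))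
        (fun x => x) false).Perm
      ((PySem.Set.ofList ks).filter
        (fun c => !(PySem.Set.contains (PySem.Set.ofList pvCATEGORY_ORDER) c))) :=
    PySem.List.sorted_perm _ _ _
  apply PySem.List.sorted_eq_of_perm_of_pairwise_lt
  · -- permutation: the partition is a rearrangement of the set
    have h2 : (pvCATEGORY_ORDER.filter (fun c => PySem.Set.contains (PySem.Set.ofList ks) c)).Perm
        ((PySem.Set.ofList ks).filter
          (fun c => PySem.Set.contains (PySem.Set.ofList pvCATEGORY_ORDER) c)) := by
      rw [List.perm_ext_iff_of_nodup ((by decide : pvCATEGORY_ORDER.Nodup).filter _)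
        (hSnd.filter _)]
      intro a
      simp only [List.mem_filter, PySem.Set.contains_iff, PySem.Set.mem_ofList]
      tauto
    exact (h2.append hrest_perm).trans
      (List.filter_append_perm (fun c => PySem.Set.contains (PySem.Set.ofList pvCATEGORY_ORDER) c) _)
  · -- strict pairwise order of the key along the partition
    rw [List.pairwise_append]
    refine ⟨pairwise_keyB_order.filter _, ?_, ?_⟩
    · -- leftovers: sorted strictly (nodup), and equal rank '8' compares by name
      have hnd : (PySem.List.sorted
          ((PySem.Set.ofList ks).filter
            (fun c => !(PySem.Set.contains (PySem.Set.ofList pvCATEGORY_ORDER) c)))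
          (fun x => x) false).Nodup :=
        hrest_perm.nodup_iff.mpr (hSnd.filter _)
      have hle := PySem.List.sorted_pairwise
        ((PySem.Set.ofList ks).filter
          (fun c => !(PySem.Set.contains (PySem.Set.ofList pvCATEGORY_ORDER) c)))
        (fun x => x)
      have hlt : (PySem.List.sorted
          ((PySem.Set.ofList ks).filter
            (fun c => !(PySem.Set.contains (PySem.Set.ofList pvCATEGORY_ORDER) c)))
          (fun x => x) false).Pairwise (· < ·) :=
        (hle.and hnd).imp (fun h => lt_of_le_of_ne h.1 h.2)
      refine hlt.imp_of_mem (fun hma hmb hab => ?_)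
      have hna := (List.mem_filter.mp (hrest_perm.subset hma)).2
      have hnb := (List.mem_filter.mp (hrest_perm.subset hmb)).2
      simp only [Bool.not_eq_true', ← Bool.not_eq_true, hOS] at hna hnb
      exact keyB_lt_of_not_mem hna hnb hab
    · intro a hma b hmb
      have ha := (List.mem_filter.mp hma).1
      have hnb := (List.mem_filter.mp (hrest_perm.subset hmb)).2
      simp only [Bool.not_eq_true', ← Bool.not_eq_true, hOS] at hnb
      exact keyB_lt_cross ha hnb

-- ===== VERDICT (by name: the statement is the Claim_ definition above) =====
theorem render_category_sidebar_spec : Claim_equal_render_category_sidebar := by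
  intro counts _
  unfold Spec_render_category_sidebar
  simp only [render_category_sidebar, render_category_sidebar_alt]
  rw [sorted_key_eq_ordered, PySem.List.foldl_append_singleton_eq_map]
  simp
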